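-- pv_equiv track=rewrite | github.com/TrinhManhHung/PYTHON_PTIT | PY01024 - CHẴN - LẺ.py | solve
-- ===== SOURCE A (Python) =====
-- def solve(n):
--     sumOfDigit = 0;
--
--     r = n % 10
--     sumOfDigit += n % 10
--     n //= 10
--     while n != 0 :
--         du = n % 10
--         sumOfDigit += du
--         if abs(du - r) != 2:
--             return False;
--         r = du
--         n //= 10
--
--     return True if sumOfDigit % 10 == 0 else False
-- ===== SOURCE B (Python) =====
-- def solve(n):
--     # Negative n never satisfies the check (Python's floor-division digit
--     # stream for n < 0 ends in repeating 9s, whose adjacent difference is 0).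
--     if n < 0:
--         return False
--     s = str(n)
--     return all(abs(ord(a) - ord(b)) == 2 for a, b in zip(s, s[1:])) and sum(map(int, s)) % 10 == 0
-- ===== Notes on version B (the rewrite author's own statement) =====
-- stated objective: alternative
-- what changed: B drops A's arithmetic digit loop entirely: it converts n to its decimal string once with str(n) and checks adjacency over character-code differences of zipped neighbours and the digit sum via sum(map(int, s)), rejecting negative n up front because their floor-division digit stream ends in repeating 9s whose adjacent difference is 0.
import Mathlib
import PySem

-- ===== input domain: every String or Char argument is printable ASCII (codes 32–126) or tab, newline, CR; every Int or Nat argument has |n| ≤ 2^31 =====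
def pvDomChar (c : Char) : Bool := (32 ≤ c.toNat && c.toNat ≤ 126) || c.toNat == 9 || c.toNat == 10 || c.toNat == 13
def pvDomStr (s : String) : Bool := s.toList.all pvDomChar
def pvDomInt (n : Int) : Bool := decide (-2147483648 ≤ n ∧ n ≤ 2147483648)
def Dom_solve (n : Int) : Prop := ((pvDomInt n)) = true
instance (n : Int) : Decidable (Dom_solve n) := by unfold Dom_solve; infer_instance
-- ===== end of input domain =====

-- B replaces A's arithmetic digit loop by one str(n) conversion and two checks
-- over the decimal string's characters (alternative decomposition; same cost).

-- ===== PORT A =====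
-- A's while loop; the fuel only makes the recursion total and is never
-- exhausted (the loop stops within natAbs n + 2 iterations: for nonnegative n
-- the argument shrinks to 0, for negative n the repeating 9-tail fails the
-- adjacency test), as proved by the lemmas below.
def solveLoop : Nat → Int → Int → Int → Bool
  | 0, _, _, _ => false
  | fuel+1, sumOfDigit, r, n =>
    if n = 0 then decide (PySem.Int.mod sumOfDigit 10 = 0)
    else
      let du := PySem.Int.mod n 10
      let sumOfDigit := sumOfDigit + du
      if (du - r).natAbs ≠ 2 then false
      else solveLoop fuel sumOfDigit du (PySem.Int.floordiv n 10)

def solve (n : Int) : Bool :=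
  let r := PySem.Int.mod n 10
  let sumOfDigit := 0 + PySem.Int.mod n 10
  solveLoop (n.natAbs + 2) sumOfDigit r (PySem.Int.floordiv n 10)

-- ===== PORT B =====
-- Source B works on the decimal string: str(n) is PySem.Int.toChars n
-- (= (PySem.Int.toStr n).toList); zip(s, s[1:]) over characters is
-- cs.zip cs.tail; ord(c) is c.toNat; int(c) on a single digit character of
-- str(n) (n ≥ 0 here) is exactly (c.toNat : Int) - 48.
def solve_alt (n : Int) : Bool :=
  if n < 0 then false
  else
    let cs := PySem.Int.toChars n
    (cs.zip cs.tail).all (fun p => ((p.1.toNat : Int) - (p.2.toNat : Int)).natAbs == 2)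
      && decide (PySem.Int.mod (cs.map (fun c => ((c.toNat : Int) - 48))).sum 10 = 0)

-- ===== PRECONDITION & SPEC =====
def Spec_solve (n : Int) (out : Bool) : Prop := out = solve_alt n
instance (n : Int) (out : Bool) : Decidable (Spec_solve n out) := by unfold Spec_solve; infer_instance

-- ===== CLAIM (what is proved, stated in full; the proofs are below) =====
def Claim_equal_solve : Prop := ∀ (n : Int), Dom_solve n → Spec_solve n (solve n)

-- ===== LEMMAS AND PROOFS =====

-- little-endian digit list of a natural number (proof-only helper)
def digitsB (n : Nat) : List Int :=
  if h : n / 10 = 0 then [((n % 10 : Nat) : Int)]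
  else ((n % 10 : Nat) : Int) :: digitsB (n / 10)
termination_by n
decreasing_by exact Nat.div_lt_self (by omega) (by omega)

-- A's adjacency test on a digit list
def adjOK (digs : List Int) : Bool :=
  (digs.zip digs.tail).all (fun p => (p.1 - p.2).natAbs == 2)

theorem adjOK_cons_cons (a b : Int) (l : List Int) :
    adjOK (a :: b :: l) = (((a - b).natAbs == 2) && adjOK (b :: l)) := by
  simp [adjOK]

theorem adjOK_single (a : Int) : adjOK [a] = true := by simp [adjOK]

theorem loop_neg_one (f : Nat) (sum : Int) : solveLoop (f+1) sum 9 (-1) = false := by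
  simp [solveLoop]

theorem loop_neg : ∀ (fuel : Nat) (n sum r : Int), n < 0 → n.natAbs + 2 ≤ fuel →
    solveLoop fuel sum r n = false := by
  intro fuel
  induction fuel with
  | zero => intro n sum r hn hf; omega
  | succ f ih =>
    intro n sum r hn hf
    have hne : n ≠ 0 := by omega
    simp only [solveLoop]
    rw [if_neg hne]
    by_cases hadj : (PySem.Int.mod n 10 - r).natAbs ≠ 2
    · rw [if_pos hadj]
    · rw [if_neg hadj]
      by_cases h1 : n = -1
      · subst h1
        have hm : PySem.Int.mod (-1) 10 = 9 := by decide
        have hd : PySem.Int.floordiv (-1) 10 = -1 := by decide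
        obtain ⟨f', rfl⟩ : ∃ f', f = f' + 1 := ⟨f - 1, by omega⟩
        rw [hm, hd]
        exact loop_neg_one f' _
      · have hid := PySem.Int.floordiv_mul_add_mod n 10
        have hm0 : 0 ≤ PySem.Int.mod n 10 := PySem.Int.mod_nonneg n (by omega)
        have hm1 : PySem.Int.mod n 10 < 10 := PySem.Int.mod_lt n (by omega)
        have hq : PySem.Int.floordiv n 10 < 0 ∧ n < PySem.Int.floordiv n 10 := by omega
        exact ih _ _ _ hq.1 (by omega)

theorem loop_nonneg : ∀ (fuel m : Nat) (sum r : Int), m + 1 ≤ fuel →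
    solveLoop fuel sum r (m : Int) =
      if m = 0 then decide (PySem.Int.mod sum 10 = 0)
      else adjOK (r :: digitsB m) && decide (PySem.Int.mod (sum + (digitsB m).sum) 10 = 0) := by
  intro fuel
  induction fuel with
  | zero => intro m sum r hf; omega
  | succ f ih =>
    intro m sum r hf
    by_cases hm : m = 0
    · subst hm; simp [solveLoop]
    · have hmz : (m : Int) ≠ 0 := by exact_mod_cast hm
      have hmod : PySem.Int.mod (m : Int) 10 = ((m % 10 : Nat) : Int) := by
        exact_mod_cast PySem.Int.mod_natCast m 10
      have hdiv : PySem.Int.floordiv (m : Int) 10 = ((m / 10 : Nat) : Int) := by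
        exact_mod_cast PySem.Int.floordiv_natCast m 10
      have hlt : m / 10 < m := Nat.div_lt_self (by omega) (by omega)
      have ih' := ih (m / 10) (sum + ((m % 10 : Nat) : Int)) ((m % 10 : Nat) : Int) (by omega)
      simp only [solveLoop]
      rw [if_neg hmz, hmod, hdiv, if_neg hm, digitsB]
      by_cases hq : m / 10 = 0
      · rw [dif_pos hq]
        rw [hq] at ih'
        rw [if_pos rfl] at ih'
        rw [hq, ih']
        have hsum : [((m % 10 : Nat) : Int)].sum = ((m % 10 : Nat) : Int) := by simp
        have hadjv : adjOK [r, ((m % 10 : Nat) : Int)] =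
            ((r - ((m % 10 : Nat) : Int)).natAbs == 2) := by simp [adjOK]
        rw [hsum, hadjv]
        by_cases hadj : (((m % 10 : Nat) : Int) - r).natAbs = 2
        · rw [if_neg (show ¬(((m % 10 : Nat) : Int) - r).natAbs ≠ 2 by omega)]
          have hsym : ((r - ((m % 10 : Nat) : Int)).natAbs == 2) = true := by
            simp only [beq_iff_eq]; omega
          rw [hsym, Bool.true_and]
        · rw [if_pos hadj]
          have hsym : ((r - ((m % 10 : Nat) : Int)).natAbs == 2) = false := by
            simp only [beq_eq_false_iff_ne, ne_eq]; omega
          rw [hsym, Bool.false_and]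
      · rw [dif_neg hq]
        rw [if_neg hq] at ih'
        rw [ih']
        have hsum : (((m % 10 : Nat) : Int) :: digitsB (m / 10)).sum =
            ((m % 10 : Nat) : Int) + (digitsB (m / 10)).sum := by simp
        rw [hsum, adjOK_cons_cons]
        by_cases hadj : (((m % 10 : Nat) : Int) - r).natAbs = 2
        · rw [if_neg (show ¬(((m % 10 : Nat) : Int) - r).natAbs ≠ 2 by omega)]
          have hsym : ((r - ((m % 10 : Nat) : Int)).natAbs == 2) = true := by
            simp only [beq_iff_eq]; omega
          rw [hsym, Bool.true_and, add_assoc]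
        · rw [if_pos hadj]
          have hsym : ((r - ((m % 10 : Nat) : Int)).natAbs == 2) = false := by
            simp only [beq_eq_false_iff_ne, ne_eq]; omega
          rw [hsym]
          simp

-- the digit-to-character map str(n) applies
def chrD (d : Int) : Char := Nat.digitChar d.toNat

theorem digitsB_bounds : ∀ (n : Nat), ∀ d ∈ digitsB n, 0 ≤ d ∧ d < 10 := by
  intro n
  induction n using Nat.strong_induction_on with
  | _ n ih =>
    intro d hd
    rw [digitsB] at hd
    by_cases hq : n / 10 = 0
    · rw [dif_pos hq] at hd
      simp at hd
      have := Nat.mod_lt n (show 0 < 10 by omega)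
      omega
    · rw [dif_neg hq] at hd
      rcases List.mem_cons.mp hd with h | h
      · have := Nat.mod_lt n (show 0 < 10 by omega)
        omega
      · exact ih (n / 10) (Nat.div_lt_self (by omega) (by omega)) d h

theorem toNat_chrD (d : Int) (h0 : 0 ≤ d) (h10 : d < 10) : ((chrD d).toNat : Int) = d + 48 := by
  have : d.toNat < 10 := by omega
  have hv : (chrD d).toNat = d.toNat + 48 := by
    unfold chrD
    interval_cases h : d.toNat <;> decide
  omega

theorem toDigitsCore_eq : ∀ (f n : Nat) (acc : List Char), n < f →
    Nat.toDigitsCore 10 f n acc = ((digitsB n).reverse.map chrD) ++ acc := by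
  intro f
  induction f with
  | zero => intro n acc h; omega
  | succ f ih =>
    intro n acc h
    rw [Nat.toDigitsCore, digitsB]
    by_cases hq : n / 10 = 0
    · rw [if_pos hq, dif_pos hq]
      simp only [List.reverse_cons, List.reverse_nil, List.nil_append, List.map_cons,
        List.map_nil, List.cons_append, chrD, Int.toNat_natCast]
    · rw [if_neg hq, dif_neg hq]
      have hn : 0 < n := by
        by_contra hc
        exact hq (by omega)
      have hlt : n / 10 < n := Nat.div_lt_self hn (by omega)
      rw [ih (n / 10) _ (by omega)]
      simp only [List.reverse_cons, List.map_append, List.map_cons, List.map_nil,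
        List.append_assoc, List.cons_append, List.nil_append, chrD, Int.toNat_natCast]

theorem toChars_nonneg (m : Nat) :
    PySem.Int.toChars (m : Int) = (digitsB m).reverse.map chrD := by
  have h1 : ¬ ((m : Int) < 0) := by omega
  have h2 : (m : Int).toNat = m := by omega
  simp only [PySem.Int.toChars, h1, if_false, h2, Nat.toDigits]
  rw [toDigitsCore_eq (m + 1) m [] (by omega), List.append_nil]

-- B's character-pair adjacency on a mapped digit list equals A's adjOK
theorem adj_map_chrD : ∀ (L : List Int), (∀ d ∈ L, 0 ≤ d ∧ d < 10) →
    (((L.map chrD).zip (L.map chrD).tail).all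
      (fun p => ((p.1.toNat : Int) - (p.2.toNat : Int)).natAbs == 2)) = adjOK L := by
  intro L
  induction L with
  | nil => intro _; simp [adjOK]
  | cons a t ih =>
    intro hb
    cases t with
    | nil => rfl
    | cons b t' =>
      have ha := hb a (by simp)
      have hbb := hb b (by simp)
      have hrest := ih (fun d hd => hb d (List.mem_cons_of_mem a hd))
      have hhead : (((chrD a).toNat : Int) - ((chrD b).toNat : Int)).natAbs = (a - b).natAbs := by
        rw [toNat_chrD a ha.1 ha.2, toNat_chrD b hbb.1 hbb.2]
        omega
      simp only [List.map_cons, List.tail_cons, List.zip_cons_cons, List.all_cons] at hrest ⊢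
      rw [adjOK_cons_cons]
      rw [hrest, hhead]

theorem adjOK_iff_chain (L : List Int) :
    adjOK L = true ↔ List.IsChain (fun a b => (a - b).natAbs = 2) L := by
  induction L with
  | nil => simp [adjOK]
  | cons a t ih =>
    cases t with
    | nil => simp [adjOK]
    | cons b t' =>
      rw [List.isChain_cons_cons, adjOK_cons_cons, ← ih]
      simp

theorem adjOK_reverse (L : List Int) : adjOK L.reverse = adjOK L := by
  have h : adjOK L.reverse = true ↔ adjOK L = true := by
    rw [adjOK_iff_chain, adjOK_iff_chain, List.isChain_reverse]
    constructor <;> (intro h; apply h.imp; intro a b hh; simp at *; omega)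
  by_cases hL : adjOK L = true
  · rw [hL, h.mpr hL]
  · have : adjOK L.reverse ≠ true := fun hc => hL (h.mp hc)
    simp only [Bool.not_eq_true] at this hL
    rw [this, hL]

theorem sum_map_chrD (L : List Int) (hb : ∀ d ∈ L, 0 ≤ d ∧ d < 10) :
    ((L.map chrD).map (fun c => ((c.toNat : Int) - 48))).sum = L.sum := by
  rw [List.map_map]
  have : L.map ((fun c => ((c.toNat : Int) - 48)) ∘ chrD) = L.map id := by
    apply List.map_congr_left
    intro d hd
    have := hb d hd
    simp only [Function.comp_apply, id_eq]
    rw [toNat_chrD d this.1 this.2]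
    omega
  rw [this, List.map_id]

theorem solve_alt_nonneg (m : Nat) :
    solve_alt (m : Int) = (adjOK (digitsB m) && decide (PySem.Int.mod (digitsB m).sum 10 = 0)) := by
  have h1 : ¬ (m : Int) < 0 := by omega
  have hb := digitsB_bounds m
  have hbr : ∀ d ∈ (digitsB m).reverse, 0 ≤ d ∧ d < 10 := by
    intro d hd; exact hb d (List.mem_reverse.mp hd)
  simp only [solve_alt]
  rw [if_neg h1, toChars_nonneg, adj_map_chrD _ hbr, adjOK_reverse,
    sum_map_chrD _ hbr, List.sum_reverse]

-- ===== VERDICT (by name: the statement is the Claim_ definition above) =====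
theorem solve_spec : Claim_equal_solve := by
  unfold Claim_equal_solve Spec_solve
  intro n _
  by_cases hn : n < 0
  · have hid := PySem.Int.floordiv_mul_add_mod n 10
    have hm0 : 0 ≤ PySem.Int.mod n 10 := PySem.Int.mod_nonneg n (by omega)
    have hm1 : PySem.Int.mod n 10 < 10 := PySem.Int.mod_lt n (by omega)
    have hq : PySem.Int.floordiv n 10 < 0 ∧ n ≤ PySem.Int.floordiv n 10 := by omega
    unfold solve solve_alt
    rw [if_pos hn]
    exact loop_neg _ _ _ _ hq.1 (by omega)
  · obtain ⟨m, rfl⟩ : ∃ m : Nat, n = (m : Int) := ⟨n.toNat, by omega⟩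
    have hmod : PySem.Int.mod (m : Int) 10 = ((m % 10 : Nat) : Int) := by
      exact_mod_cast PySem.Int.mod_natCast m 10
    have hdiv : PySem.Int.floordiv (m : Int) 10 = ((m / 10 : Nat) : Int) := by
      exact_mod_cast PySem.Int.floordiv_natCast m 10
    have hfuel : m / 10 + 1 ≤ (m : Int).natAbs + 2 := by
      have := Nat.div_le_self m 10
      simp only [Int.natAbs_natCast]; omega
    rw [solve_alt_nonneg]
    unfold solve
    rw [hmod, hdiv, loop_nonneg _ _ _ _ hfuel]
    by_cases hq : m / 10 = 0
    · rw [if_pos hq, digitsB, dif_pos hq, adjOK_single, Bool.true_and]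
      have hsum : [((m % 10 : Nat) : Int)].sum = ((m % 10 : Nat) : Int) := by simp
      rw [hsum, zero_add]
    · rw [if_neg hq]
      conv_rhs => rw [digitsB]
      rw [dif_neg hq]
      have hsum : (((m % 10 : Nat) : Int) :: digitsB (m / 10)).sum =
          ((m % 10 : Nat) : Int) + (digitsB (m / 10)).sum := by simp
      rw [hsum, zero_add]
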